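-- pv_equiv track=rewrite | github.com/KMORaza/leetcode-solutions | LeetCode Solutions/2111.py | kIncreasing
-- ===== SOURCE A (Python) =====
-- from typing import List
-- import bisect
--
-- def kIncreasing(arr: List[int], k: int) -> int:
--     def longest_non_decreasing_subsequence(seq):
--         dp = []
--         for x in seq:
--             pos = bisect.bisect_right(dp, x)
--             if pos == len(dp):
--                 dp.append(x)
--             else:
--                 dp[pos] = x
--         return len(dp)
--     n = len(arr)
--     total_removals = 0
--     for start in range(k):
--         subsequence = arr[start:n:k]
--         lnds_length = longest_non_decreasing_subsequence(subsequence)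
--         total_removals += len(subsequence) - lnds_length
--     return total_removals
-- ===== SOURCE B (Python) =====
-- from typing import List
--
-- def kIncreasing(arr: List[int], k: int) -> int:
--     def lnds_length(seq):
--         pairs = []  # (value, length of longest non-decreasing subsequence ending there)
--         for x in seq:
--             cur = 1
--             for v, l in pairs:
--                 if v <= x and l + 1 > cur:
--                     cur = l + 1
--             pairs.append((x, cur))
--         best = 0
--         for _, l in pairs:
--             if l > best:
--                 best = l
--         return best
--     n = len(arr)
--     total = 0
--     for start in range(k):
--         sub = arr[start:n:k]
--         total += len(sub) - lnds_length(sub)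
--     return total
-- ===== Notes on version B (the rewrite author's own statement) =====
-- stated objective: alternative
-- what changed: Per residue class the longest non-decreasing subsequence length is computed by a quadratic DP over (value, best-length-ending-here) pairs instead of patience sorting with bisect_right on a tails array.
import Mathlib
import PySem

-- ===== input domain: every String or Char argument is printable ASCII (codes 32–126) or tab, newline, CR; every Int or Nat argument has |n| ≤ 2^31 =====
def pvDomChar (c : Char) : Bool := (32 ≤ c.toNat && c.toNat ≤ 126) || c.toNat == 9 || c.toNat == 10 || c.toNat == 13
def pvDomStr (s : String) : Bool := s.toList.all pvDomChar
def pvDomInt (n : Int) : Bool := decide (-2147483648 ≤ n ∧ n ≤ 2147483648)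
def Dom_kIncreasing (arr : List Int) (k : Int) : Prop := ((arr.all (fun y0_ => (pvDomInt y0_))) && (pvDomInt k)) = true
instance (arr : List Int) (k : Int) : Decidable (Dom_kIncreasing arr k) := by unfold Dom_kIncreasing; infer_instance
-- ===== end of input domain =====

-- B replaces A's patience-sorting LNDS helper (tails array + bisect_right) by a quadratic
-- DP over (value, best length ending there) pairs; the outer residue-class loop is kept.

-- ===== PORT A =====
-- loop body of A's LNDS helper: pos = bisect_right(dp, x); append or overwrite dp[pos]
def pvTailsStep (dp : List Int) (x : Int) : List Int :=
  let pos := PySem.List.bisectRight dp x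
  if pos = dp.length then dp ++ [x] else dp.set pos x

-- A's longest_non_decreasing_subsequence: builds dp, returns len(dp)
def pvLndsA (seq : List Int) : Int :=
  ((seq.foldl pvTailsStep []).length : Int)

def kIncreasing (arr : List Int) (k : Int) : Int :=
  let n : Int := (arr.length : Int)
  (PySem.List.pyRange 0 k 1).foldl
    (fun total start =>
      let sub := (PySem.List.slice? arr (some start) (some n) k).getD []
      -- slice? is always `some` here: the loop runs only for k ≥ 1, so the step k is nonzero
      total + (((sub.length : Int)) - pvLndsA sub))
    0

-- ===== PORT B =====
-- loop body of B's LNDS helper: cur = best DP length ending at x, append (x, cur)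
def pvPairsStep (pairs : List (Int × Int)) (x : Int) : List (Int × Int) :=
  let cur := pairs.foldl (fun c vl => if vl.1 ≤ x ∧ c < vl.2 + 1 then vl.2 + 1 else c) 1
  pairs ++ [(x, cur)]

-- B's final scan: best = max of the recorded lengths (0 for the empty list)
def pvBestB (pairs : List (Int × Int)) : Int :=
  pairs.foldl (fun best vl => if best < vl.2 then vl.2 else best) 0

def pvLndsB (seq : List Int) : Int :=
  pvBestB (seq.foldl pvPairsStep [])

def kIncreasing_alt (arr : List Int) (k : Int) : Int :=
  let n : Int := (arr.length : Int)
  (PySem.List.pyRange 0 k 1).foldl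
    (fun total start =>
      let sub := (PySem.List.slice? arr (some start) (some n) k).getD []
      total + (((sub.length : Int)) - pvLndsB sub))
    0

-- ===== PRECONDITION & SPEC =====
def Spec_kIncreasing (arr : List Int) (k : Int) (out : Int) : Prop := out = kIncreasing_alt arr k
instance (arr : List Int) (k : Int) (out : Int) : Decidable (Spec_kIncreasing arr k out) := by unfold Spec_kIncreasing; infer_instance

-- ===== CLAIM (what is proved, stated in full; the proofs are below) =====
def Claim_equal_kIncreasing : Prop := ∀ (arr : List Int) (k : Int), Dom_kIncreasing arr k → Spec_kIncreasing arr k (kIncreasing arr k)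

-- ===== LEMMAS AND PROOFS =====

-- Invariant tying A's tails array `dp` to B's list of (value, length) pairs after the
-- same prefix has been processed:
--   * dp is sorted (non-decreasing);
--   * every recorded length l satisfies 1 ≤ l ≤ len(dp);
--   * dp[p] is the minimum value among pairs whose length is ≥ p+1, and it is attained;
--   * len(dp) equals B's running maximum of the recorded lengths.
def pvInv (dp : List Int) (acc : List (Int × Int)) : Prop :=
  dp.Pairwise (· ≤ ·)
  ∧ (∀ vl ∈ acc, 1 ≤ vl.2 ∧ vl.2 ≤ (dp.length : Int))
  ∧ (∀ (p : Nat) (hp : p < dp.length),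
      (∃ vl ∈ acc, (p : Int) + 1 ≤ vl.2 ∧ vl.1 = dp[p]) ∧
      (∀ vl ∈ acc, (p : Int) + 1 ≤ vl.2 → dp[p] ≤ vl.1))
  ∧ ((dp.length : Int) = pvBestB acc)

-- the inner fold computing `cur` never decreases its accumulator
lemma pvCur_lb_init (x : Int) (acc : List (Int × Int)) :
    ∀ c : Int, c ≤ acc.foldl (fun c vl => if vl.1 ≤ x ∧ c < vl.2 + 1 then vl.2 + 1 else c) c := by
  induction acc with
  | nil => intro c; simp
  | cons a t ih =>
    intro c
    simp only [List.foldl_cons]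
    refine le_trans ?_ (ih _)
    split_ifs with h
    · omega
    · exact le_rfl

lemma pvCur_lb_mem (x : Int) (acc : List (Int × Int)) :
    ∀ (c : Int) (vl : Int × Int), vl ∈ acc → vl.1 ≤ x →
      vl.2 + 1 ≤ acc.foldl (fun c vl => if vl.1 ≤ x ∧ c < vl.2 + 1 then vl.2 + 1 else c) c := by
  induction acc with
  | nil => intro c vl h; simp at h
  | cons a t ih =>
    intro c vl hmem hle
    simp only [List.foldl_cons]
    rcases List.mem_cons.mp hmem with h | h
    · subst h
      refine le_trans ?_ (pvCur_lb_init x t _)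
      split_ifs with hc
      · omega
      · omega
    · exact ih _ vl h hle

lemma pvCur_ub (x : Int) (acc : List (Int × Int)) (B : Int)
    (hB : ∀ vl ∈ acc, vl.1 ≤ x → vl.2 + 1 ≤ B) :
    ∀ c : Int, c ≤ B →
      acc.foldl (fun c vl => if vl.1 ≤ x ∧ c < vl.2 + 1 then vl.2 + 1 else c) c ≤ B := by
  induction acc with
  | nil => intro c hc; simpa using hc
  | cons a t ih =>
    intro c hc
    simp only [List.foldl_cons]
    refine ih (fun vl h hle => hB vl (List.mem_cons_of_mem _ h) hle) _ ?_
    split_ifs with h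
    · exact hB a (List.mem_cons_self) h.1
    · exact hc

-- one step of both loops preserves the invariant
lemma pvInv_step (dp : List Int) (acc : List (Int × Int)) (x : Int) (h : pvInv dp acc) :
    pvInv (pvTailsStep dp x) (pvPairsStep acc x) := by
  obtain ⟨hsort, hbnd, hmin, hlen⟩ := h
  obtain ⟨hposle, hlt, hge⟩ := PySem.List.bisectRight_spec dp x hsort
  set pos := PySem.List.bisectRight dp x with hpos
  -- the length B records for x is exactly pos + 1
  have hub : ∀ vl ∈ acc, vl.1 ≤ x → vl.2 + 1 ≤ (pos : Int) + 1 := by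
    intro vl hmem hle
    obtain ⟨h1, h2⟩ := hbnd vl hmem
    have hplt : (vl.2 - 1).toNat < dp.length := by omega
    have hcast : ((vl.2 - 1).toNat : Int) + 1 = vl.2 := by omega
    have hdple : dp[(vl.2 - 1).toNat] ≤ vl.1 := (hmin _ hplt).2 vl hmem (by omega)
    by_contra hcon
    have : pos ≤ (vl.2 - 1).toNat := by omega
    have := hge _ hplt this
    omega
  have hcur : acc.foldl (fun c vl => if vl.1 ≤ x ∧ c < vl.2 + 1 then vl.2 + 1 else c) 1
      = (pos : Int) + 1 := by
    refine le_antisymm (pvCur_ub x acc _ hub 1 (by omega)) ?_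
    rcases Nat.eq_zero_or_pos pos with h0 | h0
    · have := pvCur_lb_init x acc 1
      omega
    · have hq : pos - 1 < dp.length := by omega
      obtain ⟨vl, hmem, hlth, hval⟩ := (hmin (pos - 1) hq).1
      have hvx : vl.1 ≤ x := by
        rw [hval]; exact hlt _ hq (by omega)
      have := pvCur_lb_mem x acc 1 vl hmem hvx
      omega
  unfold pvTailsStep pvPairsStep
  rw [hcur]
  simp only [← hpos]
  -- B's new max of lengths
  have hbest : pvBestB (acc ++ [(x, (pos : Int) + 1)])
      = (if pvBestB acc < (pos : Int) + 1 then (pos : Int) + 1 else pvBestB acc) := by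
    unfold pvBestB
    rw [List.foldl_append]
    rfl
  have hsort' : ∀ (i j : Nat) (hi : i < dp.length) (hj : j < dp.length), i < j → dp[i] ≤ dp[j] := by
    intro i j hi hj hij
    exact List.pairwise_iff_getElem.mp hsort i j hi hj hij
  by_cases hcase : pos = dp.length
  · -- append
    rw [if_pos hcase]
    refine ⟨?_, ?_, ?_, ?_⟩
    · rw [List.pairwise_append]
      refine ⟨hsort, by simp, ?_⟩
      intro a ha b hb
      simp only [List.mem_singleton] at hb; subst hb
      obtain ⟨j, hj, rfl⟩ := List.mem_iff_getElem.mp ha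
      exact hlt j hj (by omega)
    · intro vl hmem
      rcases List.mem_append.mp hmem with hm | hm
      · obtain ⟨h1, h2⟩ := hbnd vl hm
        simp only [List.length_append, List.length_singleton]
        exact ⟨h1, by push_cast; omega⟩
      · simp only [List.mem_singleton] at hm; subst hm
        exact ⟨by omega, by simp only [List.length_append, List.length_singleton]; push_cast; omega⟩
    · intro p hp
      simp only [List.length_append, List.length_singleton] at hp
      by_cases hplt2 : p < dp.length
      · have hgetp : (dp ++ [x])[p]'(by simp; omega) = dp[p] := by
          rw [List.getElem_append_left hplt2]
        rw [hgetp]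
        obtain ⟨⟨vl, hm, hl, hv⟩, hall⟩ := hmin p hplt2
        refine ⟨⟨vl, List.mem_append_left _ hm, hl, hv⟩, ?_⟩
        intro vl' hm' hl'
        rcases List.mem_append.mp hm' with hm2 | hm2
        · exact hall vl' hm2 hl'
        · simp only [List.mem_singleton] at hm2; subst hm2
          exact hlt p hplt2 (by omega)
      · have hpeq : p = dp.length := by omega
        subst hpeq
        have hgetp : (dp ++ [x])[dp.length]'(by simp) = x := by
          simp
        rw [hgetp]
        refine ⟨⟨(x, (pos : Int) + 1), List.mem_append_right _ (by simp), by push_cast; omega, rfl⟩, ?_⟩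
        intro vl hm hl
        rcases List.mem_append.mp hm with hm2 | hm2
        · obtain ⟨h1, h2⟩ := hbnd vl hm2
          omega
        · simp only [List.mem_singleton] at hm2; subst hm2; rfl
    · rw [hbest, ← hlen]
      simp only [List.length_append, List.length_singleton]
      split_ifs with hc
      · push_cast; omega
      · omega
  · -- overwrite dp[pos]
    have hposlt : pos < dp.length := lt_of_le_of_ne hposle hcase
    simp only [if_neg hcase]
    refine ⟨?_, ?_, ?_, ?_⟩
    · rw [List.pairwise_iff_getElem]
      intro i j hi hj hij
      simp only [List.length_set] at hi hj
      rw [List.getElem_set, List.getElem_set]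
      split_ifs with h1 h2 h2
      · omega
      · subst h1; exact le_of_lt (hge j hj (by omega))
      · subst h2; exact hlt i hi (by omega)
      · exact hsort' i j hi hj hij
    · intro vl hmem
      simp only [List.length_set]
      rcases List.mem_append.mp hmem with hm | hm
      · exact hbnd vl hm
      · simp only [List.mem_singleton] at hm; subst hm
        exact ⟨by omega, by push_cast; omega⟩
    · intro p hp
      simp only [List.length_set] at hp
      rw [List.getElem_set]
      by_cases hpp : pos = p
      · subst hpp
        simp only [if_true]
        refine ⟨⟨(x, (pos : Int) + 1), List.mem_append_right _ (by simp), by omega, rfl⟩, ?_⟩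
        intro vl hm hl
        rcases List.mem_append.mp hm with hm2 | hm2
        · obtain ⟨h1, h2⟩ := hbnd vl hm2
          have hplt2 : (vl.2 - 1).toNat < dp.length := by omega
          have hdple : dp[(vl.2 - 1).toNat] ≤ vl.1 := (hmin _ hplt2).2 vl hm2 (by omega)
          have := hge _ hplt2 (by omega)
          omega
        · simp only [List.mem_singleton] at hm2; subst hm2; rfl
      · simp only [if_neg hpp]
        obtain ⟨⟨vl, hm, hl, hv⟩, hall⟩ := hmin p hp
        refine ⟨⟨vl, List.mem_append_left _ hm, hl, hv⟩, ?_⟩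
        intro vl' hm' hl'
        rcases List.mem_append.mp hm' with hm2 | hm2
        · exact hall vl' hm2 hl'
        · simp only [List.mem_singleton] at hm2; subst hm2
          simp only at hl' ⊢
          exact hlt p hp (by omega)
    · rw [hbest, ← hlen]
      simp only [List.length_set]
      split_ifs with hc
      · omega
      · rfl

-- the invariant holds after processing any sequence from the empty states
lemma pvInv_run (seq : List Int) :
    ∀ (dp : List Int) (acc : List (Int × Int)), pvInv dp acc →
      pvInv (seq.foldl pvTailsStep dp) (seq.foldl pvPairsStep acc) := by
  induction seq with
  | nil => intro dp acc h; exact h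
  | cons x t ih =>
    intro dp acc h
    simp only [List.foldl_cons]
    exact ih _ _ (pvInv_step dp acc x h)

-- per-sequence agreement of the two LNDS computations
lemma pvLnds_eq (seq : List Int) : pvLndsA seq = pvLndsB seq := by
  have h0 : pvInv ([] : List Int) ([] : List (Int × Int)) := by
    refine ⟨List.Pairwise.nil, by simp, by simp, rfl⟩
  exact (pvInv_run seq [] [] h0).2.2.2

-- ===== VERDICT (by name: the statement is the Claim_ definition above) =====
theorem kIncreasing_spec : Claim_equal_kIncreasing := by
  intro arr k _
  unfold Spec_kIncreasing kIncreasing kIncreasing_alt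
  refine PySem.List.foldl_congr_mem _ _ _ _ ?_
  intro total start _
  simp only [pvLnds_eq]
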